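-- pv_equiv track=rewrite | github.com/deepratna-awale/TAES2 | src/parsing/document_parser.py | _fill_missing_answers
-- ===== SOURCE A (Python) =====
-- from typing import Dict, List, Optional, Set, Match
--
-- def _fill_missing_answers(answers: Dict[str, str], expected_count: int) -> Dict[str, str]:
--     """Fill missing answer numbers by guessing from existing pattern"""
--     # Extract existing question numbers
--     existing_nums: Set[int] = set()
--     for key in answers.keys():
--         if key.startswith('Q'):
--             try:
--                 num: int = int(key[1:])
--                 existing_nums.add(num)
--             except ValueError:
--                 continue
--
--     # Create complete answer set
--     complete_answers: Dict[str, str] = {}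
--
--     for i in range(1, expected_count + 1):
--         question_key: str = f"Q{i}"
--
--         if i in existing_nums:
--             # Use existing answer
--             complete_answers[question_key] = answers.get(question_key, "")
--         else:
--             # Assign unmatched content or empty
--             unassigned_content: Optional[str] = None
--             for _, content in answers.items():
--                 if content not in complete_answers.values():
--                     unassigned_content = content
--                     break
--
--             complete_answers[question_key] = unassigned_content or ""
--
--     return complete_answers
-- ===== SOURCE B (Python) =====
-- def _fill_missing_answers(answers, expected_count):
--     """Fill missing answer numbers by guessing from existing pattern.
--
--     Same result as the original, but one pass: a cursor advances over the
--     values in insertion order and a set of already-used values replaces the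
--     repeated rescans of the partial result."""
--     existing = set()
--     for key in answers:
--         if key.startswith('Q'):
--             try:
--                 existing.add(int(key[1:]))
--             except ValueError:
--                 pass
--
--     vals = list(answers.values())
--     p = 0
--     used = set()
--     result = {}
--     for i in range(1, expected_count + 1):
--         key = f"Q{i}"
--         if i in existing:
--             v = answers.get(key, "")
--         else:
--             while p < len(vals) and vals[p] in used:
--                 p += 1
--             v = vals[p] if p < len(vals) else ""
--             p += 1
--         result[key] = v
--         used.add(v)
--     return result
-- ===== Notes on version B (the rewrite author's own statement) =====
-- stated objective: faster
-- what changed: Replaces the per-missing-slot rescan of answers filtered against complete_answers.values() (a nested linear scan inside a linear membership test) with a single cursor advancing once over the values in insertion order plus a hash set of already-used values.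
import Mathlib
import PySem

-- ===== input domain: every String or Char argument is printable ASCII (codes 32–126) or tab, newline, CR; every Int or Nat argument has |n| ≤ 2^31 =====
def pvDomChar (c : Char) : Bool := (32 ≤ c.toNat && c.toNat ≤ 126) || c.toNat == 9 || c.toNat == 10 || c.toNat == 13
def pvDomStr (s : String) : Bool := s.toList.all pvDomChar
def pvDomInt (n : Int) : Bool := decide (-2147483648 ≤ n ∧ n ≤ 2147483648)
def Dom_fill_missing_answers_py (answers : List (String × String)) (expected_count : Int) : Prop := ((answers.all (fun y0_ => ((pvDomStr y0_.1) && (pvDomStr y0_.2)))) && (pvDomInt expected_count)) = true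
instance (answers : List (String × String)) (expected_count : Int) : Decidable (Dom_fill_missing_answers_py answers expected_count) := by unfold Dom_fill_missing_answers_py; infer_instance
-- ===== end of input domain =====

-- B replaces A's per-missing-slot rescan of answers (filtered against the values built so far)
-- with a single forward cursor over the values plus a set of used values; measured asymptotically faster.


-- ===== PORT A =====
-- shared helper: both Pythons build existing_nums by the same loop over the keys
def fmaExisting (answers : List (String × String)) : PySem.Set Int :=
  answers.foldl (fun s kv =>
    if PySem.Str.startswith kv.1 "Q" then
      match PySem.Int.ofChars? (kv.1.toList.drop 1) with   -- int(key[1:]); key[1:] = drop 1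
      | some n => PySem.Set.add s n
      | none => s
    else s) PySem.Set.empty

-- answers.get(question_key, "") on the association list (first match)
def fmaGetD (answers : List (String × String)) (key : String) : String :=
  ((answers.find? (fun kv => kv.1 == key)).map Prod.snd).getD ""

-- loop body of A; the keys f"Q{i}" for i = 1..n are pairwise distinct, so each
-- Python dict assignment complete_answers[question_key] = v appends: ported as d ++ [(key, v)]
def fmaStepA (answers : List (String × String)) (existing : PySem.Set Int)
    (d : List (String × String)) (i : Int) : List (String × String) :=
  let key := "Q" ++ PySem.Int.toStr i
  if PySem.Set.contains existing i then
    d ++ [(key, fmaGetD answers key)]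
  else
    -- first content among answers.items() not in complete_answers.values()
    let u := (answers.map Prod.snd).find? (fun c => !((d.map Prod.snd).contains c))
    -- `unassigned_content or ""`
    d ++ [(key, match u with | some c => if c == "" then "" else c | none => "")]

def fill_missing_answers_py (answers : List (String × String)) (expected_count : Int) : List (String × String) :=
  let existing := fmaExisting answers
  (PySem.List.pyRange 1 (expected_count + 1) 1).foldl (fmaStepA answers existing) []

-- ===== PORT B =====
-- loop body of B: state (result, used, rest) where rest = vals[p:]; the Python
-- `while p < len(vals) and vals[p] in used: p += 1` is dropWhile on the suffix
def fmaStepB (answers : List (String × String)) (existing : PySem.Set Int)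
    (st : List (String × String) × PySem.Set String × List String) (i : Int) :
    List (String × String) × PySem.Set String × List String :=
  let (d, used, rest) := st
  let key := "Q" ++ PySem.Int.toStr i
  if PySem.Set.contains existing i then
    (d ++ [(key, fmaGetD answers key)], PySem.Set.add used (fmaGetD answers key), rest)
  else
    match rest.dropWhile (fun c => PySem.Set.contains used c) with
    | [] => (d ++ [(key, "")], PySem.Set.add used "", [])
    | c :: t => (d ++ [(key, c)], PySem.Set.add used c, t)

def fill_missing_answers_py_alt (answers : List (String × String)) (expected_count : Int) : List (String × String) :=
  let existing := fmaExisting answers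
  ((PySem.List.pyRange 1 (expected_count + 1) 1).foldl (fmaStepB answers existing)
    ([], PySem.Set.empty, answers.map Prod.snd)).1

-- ===== PRECONDITION & SPEC =====
def Spec_fill_missing_answers_py (answers : List (String × String)) (expected_count : Int) (out : List (String × String)) : Prop := out = fill_missing_answers_py_alt answers expected_count
instance (answers : List (String × String)) (expected_count : Int) (out : List (String × String)) : Decidable (Spec_fill_missing_answers_py answers expected_count out) := by unfold Spec_fill_missing_answers_py; infer_instance

-- ===== CLAIM (what is proved, stated in full; the proofs are below) =====
def Claim_equal_fill_missing_answers_py : Prop := ∀ (answers : List (String × String)) (expected_count : Int), Dom_fill_missing_answers_py answers expected_count → Spec_fill_missing_answers_py answers expected_count (fill_missing_answers_py answers expected_count)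

-- ===== LEMMAS AND PROOFS =====

-- find? of a negated predicate is the head after dropWhile
lemma find?_not_eq_head?_dropWhile {α : Type} (p : α → Bool) (l : List α) :
    l.find? (fun c => !(p c)) = (l.dropWhile p).head? := by
  induction l with
  | nil => rfl
  | cons a t ih => by_cases h : p a <;> simp [List.find?, List.dropWhile, h, ih]

-- the loop invariant: equal result dicts, used = the set of values placed so far,
-- rest a suffix of the values whose dropped prefix lies entirely among the placed values
lemma fma_loop (answers : List (String × String)) (existing : PySem.Set Int) (L : List Int) :
    ∀ (d : List (String × String)) (used : PySem.Set String) (rest pre : List String),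
      answers.map Prod.snd = pre ++ rest →
      (∀ v ∈ pre, v ∈ d.map Prod.snd) →
      (∀ v, v ∈ used ↔ v ∈ d.map Prod.snd) →
      L.foldl (fmaStepA answers existing) d =
        (L.foldl (fmaStepB answers existing) (d, used, rest)).1 := by
  induction L with
  | nil => intro d used rest pre _ _ _; rfl
  | cons i L ih =>
    intro d used rest pre hsplit hpre hused
    simp only [List.foldl_cons]
    have hq : (fun c => PySem.Set.contains used c)
        = (fun c => (d.map Prod.snd).contains c) := by
      funext c
      apply Bool.coe_iff_coe.mp
      rw [show PySem.Set.contains used c = List.contains used c from rfl,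
          List.contains_iff_mem, List.contains_iff_mem]
      exact hused c
    cases hexb : PySem.Set.contains existing i with
    | true =>
      -- existing slot: both sides append the same lookup and keep rest
      have hA : fmaStepA answers existing d i
          = d ++ [("Q" ++ PySem.Int.toStr i, fmaGetD answers ("Q" ++ PySem.Int.toStr i))] := by
        simp only [fmaStepA]; rw [if_pos hexb]
      have hB : fmaStepB answers existing (d, used, rest) i
          = (d ++ [("Q" ++ PySem.Int.toStr i, fmaGetD answers ("Q" ++ PySem.Int.toStr i))],
             PySem.Set.add used (fmaGetD answers ("Q" ++ PySem.Int.toStr i)), rest) := by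
        simp only [fmaStepB]; rw [if_pos hexb]
      rw [hA, hB]
      apply ih _ _ _ pre hsplit
      · intro v hv
        simp only [List.map_append, List.mem_append]
        exact Or.inl (hpre v hv)
      · intro v
        simp [PySem.Set.mem_add, hused v]
    | false =>
      have hexn : ¬ (PySem.Set.contains existing i = true) := by
        intro h; rw [h] at hexb; cases hexb
      have hdrop : rest.dropWhile (fun c => PySem.Set.contains used c)
          = rest.dropWhile (fun c => (d.map Prod.snd).contains c) := by rw [hq]
      have hfind : (answers.map Prod.snd).find? (fun c => !((d.map Prod.snd).contains c))
          = (rest.dropWhile (fun c => (d.map Prod.snd).contains c)).head? := by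
        rw [hsplit, List.find?_append,
            List.find?_eq_none.mpr
              (by intro x hx; simpa using hpre x hx),
            Option.none_or, find?_not_eq_head?_dropWhile]
      cases hd : rest.dropWhile (fun c => (d.map Prod.snd).contains c) with
      | nil =>
        -- values exhausted: A finds nothing unused, B's cursor is at the end
        have hA : fmaStepA answers existing d i
            = d ++ [("Q" ++ PySem.Int.toStr i, "")] := by
          simp only [fmaStepA]; rw [if_neg hexn, hfind, hd]; rfl
        have hB : fmaStepB answers existing (d, used, rest) i
            = (d ++ [("Q" ++ PySem.Int.toStr i, "")], PySem.Set.add used "", []) := by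
          simp only [fmaStepB]; rw [if_neg hexn, hdrop, hd]
        rw [hA, hB]
        apply ih _ _ _ (pre ++ rest)
        · rw [hsplit]; simp
        · intro v hv
          simp only [List.map_append, List.mem_append]
          rcases List.mem_append.mp hv with h | h
          · exact Or.inl (hpre v h)
          · exact Or.inl (List.contains_iff_mem.mp (List.dropWhile_eq_nil_iff.mp hd v h))
        · intro v
          simp [PySem.Set.mem_add, hused v]
      | cons c t =>
        -- A's first unused value is exactly where B's cursor stops
        have hA : fmaStepA answers existing d i
            = d ++ [("Q" ++ PySem.Int.toStr i, c)] := by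
          simp only [fmaStepA]; rw [if_neg hexn, hfind, hd]
          by_cases hc : c = "" <;> simp [hc]
        have hB : fmaStepB answers existing (d, used, rest) i
            = (d ++ [("Q" ++ PySem.Int.toStr i, c)], PySem.Set.add used c, t) := by
          simp only [fmaStepB]; rw [if_neg hexn, hdrop, hd]
        rw [hA, hB]
        apply ih _ _ _ (pre ++ rest.takeWhile (fun v => (d.map Prod.snd).contains v) ++ [c])
        · have hr : rest = rest.takeWhile (fun v => (d.map Prod.snd).contains v) ++ (c :: t) := by
            rw [← hd, List.takeWhile_append_dropWhile]
          rw [hsplit]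
          conv_lhs => rw [hr]
          simp
        · intro v hv
          simp only [List.map_append, List.mem_append]
          simp only [List.append_assoc, List.mem_append, List.mem_singleton] at hv
          rcases hv with h | h | h
          · exact Or.inl (hpre v h)
          · exact Or.inl (List.contains_iff_mem.mp (List.mem_takeWhile_imp h))
          · subst h; simp
        · intro v
          simp [PySem.Set.mem_add, hused v]

-- ===== VERDICT (by name: the statement is the Claim_ definition above) =====
theorem fill_missing_answers_py_spec : Claim_equal_fill_missing_answers_py := by
  intro answers expected_count _
  unfold Spec_fill_missing_answers_py fill_missing_answers_py fill_missing_answers_py_alt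
  exact fma_loop answers (fmaExisting answers) _ [] PySem.Set.empty (answers.map Prod.snd) []
    rfl (by intro v hv; cases hv) (by intro v; simp [PySem.Set.empty])
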